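-- pv_equiv track=rewrite | github.com/Shoeboxam/Autobot | Environment/Common.py | tag_match
-- ===== SOURCE A (Python) =====
-- def tag_match(tags, keys):
--     if tags is 'all':
--         return keys
--     else:
--         locations = []
--         for tag in tags:
--             for keyval in keys:
--                 if tag in keyval and keyval not in locations:
--                     locations.append(keyval)
--         return locations
-- ===== SOURCE B (Python) =====
-- def tag_match(tags, keys):
--     if tags is 'all':
--         return keys
--     else:
--         # Recursive candidate elimination: dedup the input once, then per tag
--         # partition the remaining candidates into matched (emitted now) and
--         # unmatched (carried forward) -- no membership test on the output ever.
--         def go(ts, remaining):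
--             if not ts:
--                 return []
--             tag, rest = ts[0], ts[1:]
--             return [kv for kv in remaining if tag in kv] + \
--                    go(rest, [kv for kv in remaining if tag not in kv])
--         return go(list(tags), list(dict.fromkeys(keys)))
-- ===== Notes on version B (the rewrite author's own statement) =====
-- stated objective: faster
-- what changed: Instead of A's single fused scan that grows an output list and dedups each candidate with an inline 'not in output' linear membership test, B dedups the input once and then recursively partitions a shrinking candidate list per tag (matched candidates are emitted, unmatched ones carried to the next tag), so no membership test on the output exists at all.
import Mathlib
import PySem

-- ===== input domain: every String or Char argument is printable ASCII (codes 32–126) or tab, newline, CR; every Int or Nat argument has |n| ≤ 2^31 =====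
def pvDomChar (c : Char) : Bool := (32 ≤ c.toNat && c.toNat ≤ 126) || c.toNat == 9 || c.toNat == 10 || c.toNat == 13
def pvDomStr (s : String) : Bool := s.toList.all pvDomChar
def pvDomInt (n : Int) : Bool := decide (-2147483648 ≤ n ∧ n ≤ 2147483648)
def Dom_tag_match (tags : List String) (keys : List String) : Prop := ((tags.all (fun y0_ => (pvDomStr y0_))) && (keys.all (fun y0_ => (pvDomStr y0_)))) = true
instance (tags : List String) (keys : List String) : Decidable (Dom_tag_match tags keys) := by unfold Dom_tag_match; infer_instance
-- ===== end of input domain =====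

-- B replaces A's fused scan with its inline linear 'not in output' dedup by candidate elimination: dedup the input once, then per tag partition a shrinking candidate list; a timing run measured B faster.


-- ===== PORT A =====
-- Under the type convention tags : List String can never be the str 'all',
-- so A's `if tags is 'all'` identity check is always False and only the else branch is ported.
def tag_match (tags : List String) (keys : List String) : List String :=
  tags.foldl (fun locations tag =>
    keys.foldl (fun locations keyval =>
      if PySem.Str.isIn tag keyval && !(locations.contains keyval) then
        locations ++ [keyval]
      else locations) locations) []

-- ===== PORT B =====
-- recursive helper `go` of Source B: emit the candidates matching the first tag, recurse on the rest
def tag_match_alt_go (ts : List String) (remaining : List String) : List String :=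
  match ts with
  | [] => []
  | tag :: rest =>
      remaining.filter (fun kv => PySem.Str.isIn tag kv)
      ++ tag_match_alt_go rest (remaining.filter (fun kv => !(PySem.Str.isIn tag kv)))

def tag_match_alt (tags : List String) (keys : List String) : List String :=
  tag_match_alt_go tags (PySem.List.dedup keys)

-- ===== PRECONDITION & SPEC =====
def Spec_tag_match (tags : List String) (keys : List String) (out : List String) : Prop := out = tag_match_alt tags keys
instance (tags : List String) (keys : List String) (out : List String) : Decidable (Spec_tag_match tags keys out) := by unfold Spec_tag_match; infer_instance

-- ===== CLAIM (what is proved, stated in full; the proofs are below) =====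
def Claim_equal_tag_match : Prop := ∀ (tags : List String) (keys : List String), Dom_tag_match tags keys → Spec_tag_match tags keys (tag_match tags keys)

-- ===== LEMMAS AND PROOFS =====
-- A's inner loop over keys equals folding Set.add over the filtered keys.
theorem inner_eq (tag : String) (keys : List String) (acc : List String) :
    keys.foldl (fun locations keyval =>
      if PySem.Str.isIn tag keyval && !(locations.contains keyval) then
        locations ++ [keyval]
      else locations) acc
    = (keys.filter (fun kv => PySem.Str.isIn tag kv)).foldl PySem.Set.add acc := by
  induction keys generalizing acc with
  | nil => rfl
  | cons k ks ih =>
    rw [List.foldl_cons, List.filter_cons, ih]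
    by_cases h : PySem.Str.isIn tag k = true
    · rw [if_pos h, List.foldl_cons]
      congr 1
      rw [h, Bool.true_and, PySem.Set.add]
      by_cases hc : acc.contains k = true
      · rw [hc, if_neg (by simp), if_pos (by simpa [PySem.Set.contains] using hc)]
      · rw [Bool.not_eq_true] at hc
        have hm : k ∉ acc := by simpa using hc
        rw [hc, if_pos (by simp), if_neg (by simp [PySem.Set.contains, hm])]
    · rw [if_neg h, Bool.not_eq_true] at *
      rw [h, Bool.false_and, if_neg (by simp)]

-- folding Set.add appends the first occurrences of the new elements
theorem foldl_add_eq (xs acc : List String) :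
    xs.foldl PySem.Set.add acc
      = acc ++ (PySem.List.dedup xs).filter (fun x => !(acc.contains x)) := by
  induction xs generalizing acc with
  | nil => simp
  | cons x xs ih =>
    have hded : PySem.List.dedup (x :: xs)
        = x :: (PySem.List.dedup xs).filter (fun y => !(([x] : List String).contains y)) := by
      rw [PySem.List.dedup_eq_ofList, PySem.Set.ofList_eq_foldl, List.foldl_cons]
      have : PySem.Set.add ([] : List String) x = [x] := by simp [PySem.Set.add, PySem.Set.contains]
      rw [this, ih]
      simp [PySem.List.dedup_eq_ofList, PySem.Set.ofList_eq_foldl]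
    rw [List.foldl_cons, ih, hded]
    by_cases hc : acc.contains x = true
    · have hcm : x ∈ acc := by simpa [List.contains_eq_mem] using hc
      have hadd : PySem.Set.add acc x = acc := by
        simp [PySem.Set.add, PySem.Set.contains, hcm]
      rw [hadd, List.filter_cons]
      have hx : (!(acc.contains x)) = false := by simp [List.contains_eq_mem, hcm]
      rw [hx]
      simp only [Bool.false_eq_true, if_false, List.filter_filter]
      congr 1
      apply List.filter_congr
      intro y _
      by_cases hyx : y = x
      · subst hyx; simp [List.contains_eq_mem, hcm]
      · simp [hyx, List.contains_eq_mem]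
    · have hcm : x ∉ acc := by simpa [List.contains_eq_mem] using hc
      have hadd : PySem.Set.add acc x = acc ++ [x] := by
        simp [PySem.Set.add, PySem.Set.contains, hcm]
      rw [hadd, List.filter_cons]
      have hx : (!(acc.contains x)) = true := by simp [List.contains_eq_mem, hcm]
      rw [hx]
      simp only [if_true, List.filter_filter, List.append_assoc, List.singleton_append]
      congr 2
      apply List.filter_congr
      intro y _
      by_cases hyx : y = x
      · subst hyx; simp
      · simp [hyx, List.contains_eq_mem]

-- dedup commutes with filter (first occurrences are preserved by filtering)
theorem dedup_filter (p : String → Bool) (xs : List String) :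
    PySem.List.dedup (xs.filter p) = (PySem.List.dedup xs).filter p := by
  induction xs with
  | nil => rfl
  | cons x xs ih =>
    have hded : ∀ (z : String) (zs : List String), PySem.List.dedup (z :: zs)
        = z :: (PySem.List.dedup zs).filter (fun y => !(([z] : List String).contains y)) := by
      intro z zs
      rw [PySem.List.dedup_eq_ofList, PySem.Set.ofList_eq_foldl, List.foldl_cons]
      have h1 : PySem.Set.add ([] : List String) z = [z] := by simp [PySem.Set.add, PySem.Set.contains]
      rw [h1, foldl_add_eq]
      simp [PySem.List.dedup_eq_ofList, PySem.Set.ofList_eq_foldl, List.contains_eq_mem]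
    rw [List.filter_cons]
    by_cases hp : p x = true
    · rw [hp]
      simp only [if_true]
      rw [hded x (xs.filter p), hded x xs, ih, List.filter_cons, hp]
      simp only [if_true, List.filter_filter]
      congr 1
      apply List.filter_congr
      intro y _
      by_cases hyx : y = x
      · subst hyx; simp
      · simp [hyx]
    · have hp' : p x = false := by simpa using hp
      rw [hp']
      simp only [Bool.false_eq_true, if_false]
      rw [ih, hded x xs, List.filter_cons, hp']
      simp only [Bool.false_eq_true, if_false, List.filter_filter]
      apply List.filter_congr
      intro y _
      by_cases hyx : y = x
      · subst hyx; simp [hp']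
      · simp [hyx]

-- main invariant: A's remaining fold from accumulator acc produces acc ++ B's go on the not-yet-collected candidates
theorem main_eq (keys : List String) (tags : List String) (acc : List String) :
    (tags.flatMap (fun t => keys.filter (fun kv => PySem.Str.isIn t kv))).foldl PySem.Set.add acc
      = acc ++ tag_match_alt_go tags ((PySem.List.dedup keys).filter (fun x => !(acc.contains x))) := by
  induction tags generalizing acc with
  | nil => simp [tag_match_alt_go]
  | cons t ts ih =>
    rw [List.flatMap_cons, List.foldl_append, ih, foldl_add_eq, dedup_filter, tag_match_alt_go]
    rw [List.append_assoc]
    congr 1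
    have hswap : ((PySem.List.dedup keys).filter (fun kv => PySem.Str.isIn t kv)).filter
          (fun x => !(acc.contains x))
        = ((PySem.List.dedup keys).filter (fun x => !(acc.contains x))).filter
          (fun kv => PySem.Str.isIn t kv) := by
      simp only [List.filter_filter]
      apply List.filter_congr
      intro y _
      exact Bool.and_comm _ _
    rw [hswap]
    congr 1
    congr 1
    -- the candidates not yet collected after tag t: drop those matching t
    simp only [List.filter_filter]
    apply List.filter_congr
    intro y hy
    by_cases hacc : acc.contains y = true
    · simp [List.contains_eq_mem, List.mem_append,
        (by simpa [List.contains_eq_mem] using hacc : y ∈ acc)]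
    · have hacc' : y ∉ acc := by simpa [List.contains_eq_mem] using hacc
      have hk : y ∈ keys := by simpa [PySem.List.mem_dedup] using hy
      by_cases ht : PySem.Str.isIn t y = true
      · simp [List.contains_eq_mem, List.mem_filter, hacc', hk]
      · have ht' : PySem.Str.isIn t y = false := by simpa using ht
        simp [List.contains_eq_mem, List.mem_filter, hacc', hk]

-- A's outer loop equals folding Set.add over the flattened matches.
theorem outer_eq (tags keys : List String) (acc : List String) :
    tags.foldl (fun locations tag =>
      keys.foldl (fun locations keyval =>
        if PySem.Str.isIn tag keyval && !(locations.contains keyval) then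
          locations ++ [keyval]
        else locations) locations) acc
    = (tags.flatMap (fun tag => keys.filter (fun kv => PySem.Str.isIn tag kv))).foldl PySem.Set.add acc := by
  induction tags generalizing acc with
  | nil => rfl
  | cons t ts ih =>
    simp only [List.foldl_cons, List.flatMap_cons, List.foldl_append]
    rw [inner_eq, ih]

-- ===== VERDICT (by name: the statement is the Claim_ definition above) =====
theorem tag_match_spec : Claim_equal_tag_match := by
  intro tags keys _
  unfold Spec_tag_match tag_match tag_match_alt
  rw [outer_eq, main_eq]
  simp
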